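-- pv_equiv track=rewrite | github.com/Lucas-Boom/CS-2 | CS2 What's in a name.py | convert_uppercase
-- ===== SOURCE A (Python) =====
-- def convert_uppercase(name):                                #define funciton to convert name to uppercase
--     '''
--     Takes a name and converts it to uppercase
--     Args:
--         name(string): User's inputed name
--     Returns:
--         the name in all uppercase letters
--     '''
--     upper_name = ""                                         #create empty string
--     for letter in name:                                     #for loop
--         num = ord(letter)                                   #convert letter to integer
--         if num > 96 and num < 123:                          #if number is greater than 96 and lesss than 123
--             num = num - 32                                  #subtract 32 from that integer
--             letter2 = chr(num)                              #convert integer to letter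
--             upper_name = upper_name + letter2               #add letter to lowered name
--         else:                                               #else
--             upper_name = upper_name + letter                #add letter to upper name
--     return upper_name                                       #return upper name
-- ===== SOURCE B (Python) =====
-- def convert_uppercase(name):
--     '''Uppercase ASCII letters via a translation table applied in one whole-string transform.'''
--     table = {c: c - 32 for c in range(97, 123)}
--     return name.translate(table)
-- ===== Notes on version B (the rewrite author's own statement) =====
-- stated objective: faster
-- what changed: Replaced the char-by-char conditional string-concatenation loop with a precomputed translation table (dict mapping codes 97..122 to code-32) applied via str.translate in one whole-string transform.
import Mathlib
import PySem

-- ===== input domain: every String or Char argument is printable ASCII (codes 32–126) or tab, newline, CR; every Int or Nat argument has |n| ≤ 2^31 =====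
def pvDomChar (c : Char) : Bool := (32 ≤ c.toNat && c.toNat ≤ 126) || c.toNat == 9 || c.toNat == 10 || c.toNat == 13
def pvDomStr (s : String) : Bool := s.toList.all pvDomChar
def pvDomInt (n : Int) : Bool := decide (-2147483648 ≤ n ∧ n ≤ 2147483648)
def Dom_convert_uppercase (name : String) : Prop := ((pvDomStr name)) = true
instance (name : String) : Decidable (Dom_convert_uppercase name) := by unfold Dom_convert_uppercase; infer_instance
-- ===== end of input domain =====

-- B builds a lowercase→uppercase translation table once and applies it in one whole-string map (idiomatic table-then-transform instead of A's per-char conditional concatenation).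

-- ===== PORT A =====
def convert_uppercase (name : String) : String :=
  name.toList.foldl
    (fun upper_name letter =>
      let num : Int := (letter.toNat : Int)
      if 96 < num ∧ num < 123 then
        upper_name ++ String.singleton (Char.ofNat (num - 32).toNat)
      else
        upper_name ++ String.singleton letter)
    ""

-- ===== PORT B =====
-- table = {c: c - 32 for c in range(97, 123)}
def pvTable : PySem.Dict Int Int :=
  (PySem.List.pyRange 97 123 1).foldl (fun d c => d.insert c (c - 32)) PySem.Dict.empty

-- name.translate(table): each char whose codepoint is a key is replaced by the mapped codepoint
def convert_uppercase_alt (name : String) : String :=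
  String.ofList (name.toList.map (fun ch =>
    match pvTable.get? ((ch.toNat : Int)) with
    | some v => Char.ofNat v.toNat
    | none => ch))

-- ===== PRECONDITION & SPEC =====
def Spec_convert_uppercase (name : String) (out : String) : Prop := out = convert_uppercase_alt name
instance (name : String) (out : String) : Decidable (Spec_convert_uppercase name out) := by unfold Spec_convert_uppercase; infer_instance

-- ===== CLAIM (what is proved, stated in full; the proofs are below) =====
def Claim_equal_convert_uppercase : Prop := ∀ (name : String), Dom_convert_uppercase name → Spec_convert_uppercase name (convert_uppercase name)

-- ===== LEMMAS AND PROOFS =====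

lemma pvFold_get (L : List Int) (d : PySem.Dict Int Int) (n : Int) :
    (L.foldl (fun d c => d.insert c (c - 32)) d).get? n
      = if n ∈ L then some (n - 32) else d.get? n := by
  induction L generalizing d with
  | nil => simp
  | cons a L ih =>
    simp only [List.foldl_cons, ih]
    by_cases hL : n ∈ L
    · simp [hL, List.mem_cons]
    · by_cases ha : n = a
      · subst ha
        simp [PySem.Dict.get?_insert_self, hL]
      · simp [PySem.Dict.get?_insert_of_ne _ _ ha, hL, ha]

lemma pvTable_get (n : Int) :
    pvTable.get? n = if 97 ≤ n ∧ n < 123 then some (n - 32) else none := by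
  unfold pvTable
  rw [pvFold_get]
  simp [PySem.List.mem_pyRange_one, PySem.Dict.get?, PySem.Dict.empty]

lemma pvChar_eq (c : Char) :
    (match pvTable.get? ((c.toNat : Int)) with
     | some v => Char.ofNat v.toNat
     | none => c)
    = (if 96 < (c.toNat : Int) ∧ (c.toNat : Int) < 123 then
         Char.ofNat (((c.toNat : Int)) - 32).toNat
       else c) := by
  rw [pvTable_get]
  by_cases h : 97 ≤ (c.toNat : Int) ∧ (c.toNat : Int) < 123
  · have h' : 96 < (c.toNat : Int) ∧ (c.toNat : Int) < 123 := ⟨by omega, h.2⟩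
    rw [if_pos h, if_pos h']
  · have h' : ¬ (96 < (c.toNat : Int) ∧ (c.toNat : Int) < 123) := by omega
    rw [if_neg h, if_neg h']

lemma pvFoldA (L : List Char) (acc : String) :
    (L.foldl
      (fun upper_name letter =>
        let num : Int := (letter.toNat : Int)
        if 96 < num ∧ num < 123 then
          upper_name ++ String.singleton (Char.ofNat (num - 32).toNat)
        else
          upper_name ++ String.singleton letter)
      acc).toList
    = acc.toList ++ L.map (fun ch =>
        match pvTable.get? ((ch.toNat : Int)) with
        | some v => Char.ofNat v.toNat
        | none => ch) := by
  induction L generalizing acc with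
  | nil => simp
  | cons c L ih =>
    simp only [List.foldl_cons, List.map_cons]
    rw [ih, pvChar_eq c]
    by_cases h : 96 < (c.toNat : Int) ∧ (c.toNat : Int) < 123
    · rw [if_pos h, if_pos h]; simp
    · rw [if_neg h, if_neg h]; simp

-- ===== VERDICT (by name: the statement is the Claim_ definition above) =====
theorem convert_uppercase_spec : Claim_equal_convert_uppercase := by
  intro name _
  unfold Spec_convert_uppercase convert_uppercase convert_uppercase_alt
  apply String.toList_injective
  rw [pvFoldA]
  simp
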